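-- pv_equiv track=rewrite | github.com/ajinrane/cadence | backend/db/seed.py | _chunk_protocol
-- ===== SOURCE A (Python) =====
-- def _chunk_protocol(content: str) -> list[dict]:
--     """Split protocol text into searchable chunks by section headers."""
--     lines = content.strip().split("\n")
--     chunks = []
--     current_header = "Overview"
--     current_lines = []
--
--     for line in lines:
--         stripped = line.strip()
--         if stripped and stripped[0].isdigit() and ". " in stripped[:5]:
--             if current_lines:
--                 chunks.append({
--                     "header": current_header,
--                     "content": "\n".join(current_lines).strip(),
--                 })
--             current_header = stripped
--             current_lines = []
--         else:
--             current_lines.append(line)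
--
--     if current_lines:
--         chunks.append({
--             "header": current_header,
--             "content": "\n".join(current_lines).strip(),
--         })
--
--     return chunks
-- ===== SOURCE B (Python) =====
-- def _chunk_protocol(content: str) -> list[dict]:
--     """Split protocol text into sections by numbered headers, scanning span by span."""
--     def is_header(line):
--         s = line.strip()
--         return bool(s) and s[0].isdigit() and ". " in s[:5]
--
--     chunks = []
--     header = "Overview"
--     rest = content.strip().split("\n")
--     while True:
--         # span: body = run of non-header lines, rest = remainder from the next header
--         i = 0
--         while i < len(rest) and not is_header(rest[i]):
--             i += 1
--         body, rest = rest[:i], rest[i:]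
--         if body:
--             chunks.append({"header": header, "content": "\n".join(body).strip()})
--         if not rest:
--             return chunks
--         header, rest = rest[0].strip(), rest[1:]
-- ===== Notes on version B (the rewrite author's own statement) =====
-- stated objective: alternative
-- what changed: Replaces A's per-line state machine (current_header/current_lines accumulators mutated line by line) with a span-by-span scan: each iteration locates the next header line, slices off the whole run of body lines before it as one chunk, and restarts at that header.
import Mathlib
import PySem

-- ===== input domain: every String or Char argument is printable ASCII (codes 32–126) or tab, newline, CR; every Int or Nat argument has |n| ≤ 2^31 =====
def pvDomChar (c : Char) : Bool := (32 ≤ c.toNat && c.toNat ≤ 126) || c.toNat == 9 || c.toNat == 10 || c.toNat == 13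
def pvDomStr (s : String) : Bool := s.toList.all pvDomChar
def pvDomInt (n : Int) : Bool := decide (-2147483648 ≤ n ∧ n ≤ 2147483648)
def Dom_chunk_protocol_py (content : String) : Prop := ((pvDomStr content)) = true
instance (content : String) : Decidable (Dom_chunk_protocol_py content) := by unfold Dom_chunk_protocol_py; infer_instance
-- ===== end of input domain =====

-- B re-decomposes A's per-line state machine into a span-by-span boundary scan (objective: alternative decomposition, same cost).

-- shared helper: the header test 'stripped and stripped[0].isdigit() and ". " in stripped[:5]' applied to an already-stripped line
def pvIsHeader (s : String) : Bool :=
  !(s == "") && ((PySem.Str.pyGet? s 0).elim false PySem.Chars.isdigit)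
    && PySem.Str.isIn ". " (PySem.Str.slice s none (some 5))

-- shared helper: {"header": h, "content": "\n".join(cur).strip()}
def pvMkChunk (header : String) (cur : List String) : List (String × String) :=
  [("header", header), ("content", PySem.Str.strip (PySem.Str.join "\n" cur))]

-- ===== PORT A =====
def chunk_protocol_py (content : String) : List (List (String × String)) :=
  let lines := (PySem.Str.split? (PySem.Str.strip content) "\n").getD []
  let st := lines.foldl
    (fun (st : List (List (String × String)) × String × List String) line =>
      let (chunks, header, cur) := st
      let stripped := PySem.Str.strip line
      if pvIsHeader stripped then
        if cur ≠ [] then (chunks ++ [pvMkChunk header cur], stripped, ([] : List String))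
        else (chunks, stripped, ([] : List String))
      else (chunks, header, cur ++ [line]))
    ([], "Overview", [])
  if st.2.2 ≠ [] then st.1 ++ [pvMkChunk st.2.1 st.2.2] else st.1

-- ===== PORT B =====
-- the 'while True' loop of Source B over the state (chunks, header, rest); the inner index
-- loop computing body = rest[:i], rest = rest[i:] is the span takeWhile/dropWhile
def pvLoop (chunks : List (List (String × String))) (header : String) (rest : List String) :
    List (List (String × String)) :=
  let body := rest.takeWhile (fun l => !pvIsHeader (PySem.Str.strip l))
  let chunks' := if body ≠ [] then chunks ++ [pvMkChunk header body] else chunks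
  match hmatch : rest.dropWhile (fun l => !pvIsHeader (PySem.Str.strip l)) with
  | [] => chunks'
  | hd :: t => pvLoop chunks' (PySem.Str.strip hd) t
termination_by rest.length
decreasing_by
  have hle := List.length_dropWhile_le (p := fun l => !pvIsHeader (PySem.Str.strip l)) (l := rest)
  rw [hmatch] at hle
  simp at hle
  omega

def chunk_protocol_py_alt (content : String) : List (List (String × String)) :=
  pvLoop [] "Overview" ((PySem.Str.split? (PySem.Str.strip content) "\n").getD [])

-- ===== PRECONDITION & SPEC =====
def Spec_chunk_protocol_py (content : String) (out : List (List (String × String))) : Prop := out = chunk_protocol_py_alt content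
instance (content : String) (out : List (List (String × String))) : Decidable (Spec_chunk_protocol_py content out) := by unfold Spec_chunk_protocol_py; infer_instance

-- ===== CLAIM (what is proved, stated in full; the proofs are below) =====
def Claim_equal_chunk_protocol_py : Prop := ∀ (content : String), Dom_chunk_protocol_py content → Spec_chunk_protocol_py content (chunk_protocol_py content)

-- ===== LEMMAS AND PROOFS =====

-- pvLoop on a list of only non-header lines: one final chunk if nonempty
lemma pvLoop_last (chunks : List (List (String × String))) (header : String)
    (cur : List String) (hcur : ∀ l ∈ cur, pvIsHeader (PySem.Str.strip l) = false) :
    pvLoop chunks header cur = if cur ≠ [] then chunks ++ [pvMkChunk header cur] else chunks := by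
  have htake : cur.takeWhile (fun l => !pvIsHeader (PySem.Str.strip l)) = cur := by
    apply List.takeWhile_eq_self_iff.mpr
    intro x hx; simp [hcur x hx]
  have hdrop : cur.dropWhile (fun l => !pvIsHeader (PySem.Str.strip l)) = [] := by
    apply List.dropWhile_eq_nil_iff.mpr
    intro x hx; simp [hcur x hx]
  rw [pvLoop]
  simp only [htake]
  split
  · rfl
  · next hd t heq => rw [hdrop] at heq; cases heq

-- pvLoop when the list is non-headers cur followed by a header hd
lemma pvLoop_step (chunks : List (List (String × String))) (header : String)
    (cur : List String) (hd : String) (t : List String)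
    (hcur : ∀ l ∈ cur, pvIsHeader (PySem.Str.strip l) = false)
    (hhd : pvIsHeader (PySem.Str.strip hd) = true) :
    pvLoop chunks header (cur ++ hd :: t)
      = pvLoop (if cur ≠ [] then chunks ++ [pvMkChunk header cur] else chunks)
          (PySem.Str.strip hd) t := by
  have h1 : cur.takeWhile (fun l => !pvIsHeader (PySem.Str.strip l)) = cur := by
    apply List.takeWhile_eq_self_iff.mpr
    intro x hx; simp [hcur x hx]
  have htake : (cur ++ hd :: t).takeWhile (fun l => !pvIsHeader (PySem.Str.strip l)) = cur := by
    rw [List.takeWhile_append, h1]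
    simp [hhd]
  have hdrop : (cur ++ hd :: t).dropWhile (fun l => !pvIsHeader (PySem.Str.strip l)) = hd :: t := by
    rw [List.dropWhile_append]
    have hd' : cur.dropWhile (fun l => !pvIsHeader (PySem.Str.strip l)) = [] := by
      apply List.dropWhile_eq_nil_iff.mpr
      intro x hx; simp [hcur x hx]
    simp [hd', hhd]
  rw [pvLoop]
  simp only [htake]
  split
  · next heq => rw [hdrop] at heq; cases heq
  · next hd1 t1 heq =>
      rw [hdrop] at heq
      cases heq
      rfl

-- the central invariant: A's fold from state (chunks, header, cur) followed by the final
-- flush equals B's loop started on cur ++ lines, provided cur holds no header line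
lemma pvKey (lines : List String) :
    ∀ (chunks : List (List (String × String))) (header : String) (cur : List String),
    (∀ l ∈ cur, pvIsHeader (PySem.Str.strip l) = false) →
    (let st := lines.foldl
        (fun (st : List (List (String × String)) × String × List String) line =>
          let (chunks, header, cur) := st
          let stripped := PySem.Str.strip line
          if pvIsHeader stripped then
            if cur ≠ [] then (chunks ++ [pvMkChunk header cur], stripped, ([] : List String))
            else (chunks, stripped, ([] : List String))
          else (chunks, header, cur ++ [line]))
        (chunks, header, cur);
      if st.2.2 ≠ [] then st.1 ++ [pvMkChunk st.2.1 st.2.2] else st.1)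
    = pvLoop chunks header (cur ++ lines) := by
  induction lines with
  | nil =>
    intro chunks header cur hcur
    simp only [List.foldl_nil, List.append_nil]
    rw [pvLoop_last chunks header cur hcur]
  | cons l ls ih =>
    intro chunks header cur hcur
    by_cases hl : pvIsHeader (PySem.Str.strip l) = true
    · rw [pvLoop_step chunks header cur l ls hcur hl]
      by_cases hc : cur = []
      · subst hc
        simpa [List.foldl_cons, hl] using ih chunks (PySem.Str.strip l) [] (by simp)
      · simpa [List.foldl_cons, hl, hc] using
          ih (chunks ++ [pvMkChunk header cur]) (PySem.Str.strip l) [] (by simp)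
    · rw [Bool.not_eq_true] at hl
      simp only [List.foldl_cons, hl]
      have hcur' : ∀ x ∈ cur ++ [l], pvIsHeader (PySem.Str.strip x) = false := by
        intro x hx
        rcases List.mem_append.mp hx with h | h
        · exact hcur x h
        · simp at h; subst h; exact hl
      simpa [List.append_assoc] using ih chunks header (cur ++ [l]) hcur'

-- ===== VERDICT (by name: the statement is the Claim_ definition above) =====
theorem chunk_protocol_py_spec : Claim_equal_chunk_protocol_py := by
  intro content _
  unfold Spec_chunk_protocol_py chunk_protocol_py chunk_protocol_py_alt
  simpa using pvKey ((PySem.Str.split? (PySem.Str.strip content) "\n").getD []) [] "Overview" [] (by simp)
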